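-- pv_equiv track=rewrite | github.com/vishalshirke7/DSA | prefix_array/maximize-number-0s-flipping-subarray.py | findMaxZeroCount
-- ===== SOURCE A (Python) =====
-- def findMaxZeroCount(arr, n):
-- 	original_zero_count = 0
-- 	current_diff = max_diff = 0
-- 	for val in arr:
-- 		if val == 0:
-- 			original_zero_count += 1
-- 		current_val = 1 if val == 1 else -1
-- 		current_diff = max(current_val, current_diff + current_val)
-- 		max_diff = max(current_diff, max_diff)
-- 	max_diff = max(0, max_diff)
-- 	return original_zero_count + max_diff
-- ===== SOURCE B (Python) =====
-- def findMaxZeroCount(arr, n):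
--     zeros = arr.count(0)
--     prefixes = [0]
--     for val in arr:
--         prefixes.append(prefixes[-1] + (1 if val == 1 else -1))
--     lowest = prefixes[0]
--     best = 0
--     for p in prefixes[1:]:
--         if p - lowest > best:
--             best = p - lowest
--         if p < lowest:
--             lowest = p
--     return zeros + best
-- ===== Notes on version B (the rewrite author's own statement) =====
-- stated objective: alternative
-- what changed: Replaces A's single-pass Kadane DP (zero count, best-ending-here and global max updated together, then a final clamp to 0) with staged passes: count zeros with list.count, materialize the prefix-sum array of the +1/-1 gains, then scan the prefixes tracking their historical minimum; initializing the minimum to prefix 0 makes the clamp implicit.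
import Mathlib
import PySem

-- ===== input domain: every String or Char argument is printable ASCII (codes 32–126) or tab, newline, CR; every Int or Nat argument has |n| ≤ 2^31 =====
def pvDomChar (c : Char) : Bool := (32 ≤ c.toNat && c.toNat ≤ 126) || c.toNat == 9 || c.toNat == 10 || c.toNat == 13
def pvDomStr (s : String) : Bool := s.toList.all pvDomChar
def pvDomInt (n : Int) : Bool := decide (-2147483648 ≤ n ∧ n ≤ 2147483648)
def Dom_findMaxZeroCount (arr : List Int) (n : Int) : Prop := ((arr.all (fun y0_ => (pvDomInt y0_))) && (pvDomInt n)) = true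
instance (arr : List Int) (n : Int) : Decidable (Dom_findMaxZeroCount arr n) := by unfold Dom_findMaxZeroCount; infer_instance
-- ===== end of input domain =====

-- B replaces A's one-pass Kadane DP with staged passes (count zeros, build the prefix-sum list, scan it against its historical minimum); same O(n) cost.

-- ===== PORT A =====
-- Kadane step on state (original_zero_count, current_diff, max_diff)
def stepA (st : Int × Int × Int) (val : Int) : Int × Int × Int :=
  let zc := if val = 0 then st.1 + 1 else st.1
  let cv : Int := if val = 1 then 1 else -1
  let cd := max cv (st.2.1 + cv)
  let md := max cd st.2.2
  (zc, cd, md)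

def findMaxZeroCount (arr : List Int) (n : Int) : Int :=
  let s := arr.foldl stepA (0, 0, 0)
  s.1 + max 0 s.2.2

-- ===== PORT B =====
-- gain of one element
def gainB (val : Int) : Int := if val = 1 then 1 else -1

-- scan step on state (lowest, best)
def stepB (st : Int × Int) (p : Int) : Int × Int :=
  let best := if p - st.1 > st.2 then p - st.1 else st.2
  let lowest := if p < st.1 then p else st.1
  (lowest, best)

def findMaxZeroCount_alt (arr : List Int) (n : Int) : Int :=
  let zeros : Int := (arr.count 0 : Nat)
  let prefixes := (arr.map gainB).scanl (· + ·) 0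
  let s := prefixes.tail.foldl stepB (0, 0)
  zeros + s.2

-- ===== PRECONDITION & SPEC =====
def Spec_findMaxZeroCount (arr : List Int) (n : Int) (out : Int) : Prop := out = findMaxZeroCount_alt arr n
instance (arr : List Int) (n : Int) (out : Int) : Decidable (Spec_findMaxZeroCount arr n out) := by unfold Spec_findMaxZeroCount; infer_instance

-- ===== CLAIM (what is proved, stated in full; the proofs are below) =====
def Claim_equal_findMaxZeroCount : Prop := ∀ (arr : List Int) (n : Int), Dom_findMaxZeroCount arr n → Spec_findMaxZeroCount arr n (findMaxZeroCount arr n)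

-- ===== LEMMAS AND PROOFS =====

-- peel the head of a scanl under a foldl
theorem foldl_scanl_peel (L : List Int) (b : Int) (st : Int × Int) :
    (L.scanl (· + ·) b).foldl stepB st = ((L.scanl (· + ·) b).tail).foldl stepB (stepB st b) := by
  cases L <;> simp [List.scanl_cons]

-- A's Kadane components do not depend on the zero-count slot
theorem snd_inv (l : List Int) : ∀ zc zc' cd md : Int,
    (l.foldl stepA (zc, cd, md)).2 = (l.foldl stepA (zc', cd, md)).2 := by
  induction l with
  | nil => intro _ _ _ _; rfl
  | cons v t ih =>
    intro zc zc' cd md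
    simp only [List.foldl_cons, stepA]
    apply ih

-- A's zero count component
theorem zc_inv (l : List Int) : ∀ zc cd md : Int,
    (l.foldl stepA (zc, cd, md)).1 = zc + (l.count 0 : Nat) := by
  induction l with
  | nil => intro zc cd md; simp
  | cons v t ih =>
    intro zc cd md
    simp only [List.foldl_cons, List.count_cons, ih, stepA]
    by_cases h : v = 0 <;> simp [h] <;> omega

-- main invariant: B's prefix scan computes the clamp of A's Kadane max
theorem max_inv (l : List Int) : ∀ cd md run mp mdB : Int,
    run - mp = max 0 cd → mdB = max 0 md →
    ((((l.map gainB).scanl (· + ·) run).tail).foldl stepB (mp, mdB)).2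
      = max 0 (l.foldl stepA (0, cd, md)).2.2 := by
  induction l with
  | nil => intro cd md run mp mdB h1 h2; simpa using h2
  | cons v t ih =>
    intro cd md run mp mdB h1 h2
    simp only [List.map_cons, List.scanl_cons, List.tail_cons]
    rw [foldl_scanl_peel]
    have := ih (max (gainB v) (cd + gainB v)) (max (max (gainB v) (cd + gainB v)) md)
      (run + gainB v) (stepB (mp, mdB) (run + gainB v)).1 (stepB (mp, mdB) (run + gainB v)).2
      (by simp only [stepB, gainB]; split_ifs <;> omega)
      (by simp only [stepB, gainB]; split_ifs <;> omega)
    rw [this]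
    congr 1
    have e : stepA (0, cd, md) v
        = ((if v = 0 then (1:Int) else 0), max (gainB v) (cd + gainB v),
            max (max (gainB v) (cd + gainB v)) md) := by
      simp [stepA, gainB]
    rw [List.foldl_cons, e]
    exact (congrArg Prod.snd (snd_inv t (if v = 0 then 1 else 0) 0 _ _)).symm

-- ===== VERDICT (by name: the statement is the Claim_ definition above) =====
theorem findMaxZeroCount_spec : Claim_equal_findMaxZeroCount := by
  intro arr n _
  unfold Spec_findMaxZeroCount findMaxZeroCount findMaxZeroCount_alt
  show (arr.foldl stepA (0,0,0)).1 + max 0 (arr.foldl stepA (0,0,0)).2.2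
      = ((arr.count 0 : Nat) : Int) + (((arr.map gainB).scanl (· + ·) 0).tail.foldl stepB (0,0)).2
  rw [max_inv arr 0 0 0 0 0 (by simp) (by simp)]
  have hz := zc_inv arr 0 0 0
  omega
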